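-- pv_equiv track=rewrite | github.com/ASSERT-KTH/DET-Gen | experiments/pynguin/c4b/single-return/generated_tests/src_420/2/src_420.py | func
-- ===== SOURCE A (Python) =====
-- def func(*args):
--
-- 	n = int(args[0])
-- 	c = 0
-- 	for i in range(1, (n + 1)):
-- 	    if (i == 1):
-- 	        c += n
-- 	    elif (i == n):
-- 	        c += 1
-- 	    else:
-- 	        c += (((i - 1) * ((n + 1) - i)) + 1)
-- 	return(c)
-- ===== SOURCE B (Python) =====
-- def func(*args):
--     # Closed form: sum_{i=1}^{n} ((i-1)*(n+1-i)+1) = n*(n*n+5)//6 (the i=1 and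
--     # i=n special cases in A cancel each other); empty sum for n < 1.
--     n = int(args[0])
--     return n * (n * n + 5) // 6 if n >= 0 else 0
-- ===== Notes on version B (the rewrite author's own statement) =====
-- stated objective: faster
-- what changed: Replaced the O(n) loop over range(1, n+1) with the closed-form formula n*(n*n+5)//6 (guarded to 0 for negative n, where the loop is empty).
import Mathlib
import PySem

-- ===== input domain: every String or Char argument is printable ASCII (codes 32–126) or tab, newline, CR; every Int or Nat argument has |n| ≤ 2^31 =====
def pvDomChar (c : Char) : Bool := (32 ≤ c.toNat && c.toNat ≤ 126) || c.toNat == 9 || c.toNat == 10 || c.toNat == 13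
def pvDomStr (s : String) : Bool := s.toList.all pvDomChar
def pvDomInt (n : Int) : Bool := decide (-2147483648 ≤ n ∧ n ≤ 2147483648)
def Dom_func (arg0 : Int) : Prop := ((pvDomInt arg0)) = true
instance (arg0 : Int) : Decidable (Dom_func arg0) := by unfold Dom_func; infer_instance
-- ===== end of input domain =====

-- B replaces A's O(n) summation loop by the closed-form value n*(n*n+5)//6 (0 for n < 0).

-- ===== PORT A =====
def func (arg0 : Int) : Int :=
  (PySem.List.pyRange 1 (arg0 + 1) 1).foldl
    (fun c i =>
      if i = 1 then c + arg0
      else if i = arg0 then c + 1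
      else c + ((i - 1) * ((arg0 + 1) - i) + 1)) 0

-- ===== PORT B =====
def func_alt (arg0 : Int) : Int :=
  if 0 ≤ arg0 then PySem.Int.floordiv (arg0 * (arg0 * arg0 + 5)) 6 else 0

-- ===== PRECONDITION & SPEC =====
def Spec_func (arg0 : Int) (out : Int) : Prop := out = func_alt arg0
instance (arg0 : Int) (out : Int) : Decidable (Spec_func arg0 out) := by unfold Spec_func; infer_instance

-- ===== CLAIM (what is proved, stated in full; the proofs are below) =====
def Claim_equal_func : Prop := ∀ (arg0 : Int), Dom_func arg0 → Spec_func arg0 (func arg0)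

-- ===== LEMMAS AND PROOFS =====

-- the per-iteration summand of A's loop
def hTerm (n i : Int) : Int :=
  if i = 1 then n else if i = n then 1 else (i - 1) * ((n + 1) - i) + 1

-- the generic (else-branch) summand
def gTerm (n i : Int) : Int := (i - 1) * ((n + 1) - i) + 1

lemma func_eq_sum (n : Int) :
    func n = ((PySem.List.pyRange 1 (n + 1) 1).map (hTerm n)).sum := by
  unfold func
  have : (fun (c i : Int) =>
      if i = 1 then c + n
      else if i = n then c + 1
      else c + ((i - 1) * ((n + 1) - i) + 1)) =
      (fun (c i : Int) => c + hTerm n i) := by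
    funext c i
    unfold hTerm
    split_ifs <;> rfl
  rw [this, PySem.List.foldl_add]
  simp

lemma sum_g_range (n : Int) (m : Nat) :
    6 * (((List.range m).map (fun (k : Nat) => gTerm n (1 + (k : Int)))).sum) =
      6 * m + 3 * n * m * (m - 1) - (m - 1) * m * (2 * m - 1) := by
  induction m with
  | zero => simp
  | succ m ih =>
    rw [List.range_succ, List.map_append, List.sum_append]
    push_cast
    push_cast at ih
    unfold gTerm
    unfold gTerm at ih
    simp only [List.map_cons, List.map_nil, List.sum_cons, List.sum_nil]
    nlinarith [ih]

lemma sum_h_eq_sum_g (n : Int) :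
    ((PySem.List.pyRange 1 (n + 1) 1).map (hTerm n)).sum =
      ((PySem.List.pyRange 1 (n + 1) 1).map (gTerm n)).sum := by
  rcases (by omega : n ≤ 0 ∨ 0 < n) with hle | hpos
  · rw [PySem.List.pyRange_one_eq_nil (by omega)]
    simp
  · rcases eq_or_lt_of_le (by omega : (1 : Int) ≤ n) with h1 | h2
    · -- n = 1
      rw [show n + 1 = 1 + 1 by omega, PySem.List.pyRange_one_singleton]
      simp [hTerm, gTerm, ← h1]
    · -- n ≥ 2 : split as [1] ++ middle ++ [n]
      have hsplit : PySem.List.pyRange 1 (n + 1) 1 =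
          PySem.List.pyRange 1 2 1 ++ (PySem.List.pyRange 2 n 1 ++ [n]) := by
        rw [← PySem.List.pyRange_one_succ_right (by omega),
            ← PySem.List.pyRange_one_append 1 2 (n + 1) (by omega) (by omega)]
      have hone : PySem.List.pyRange 1 2 1 = [1] := by
        have := PySem.List.pyRange_one_singleton (a := (1 : Int))
        simpa using this
      have hmid : (PySem.List.pyRange 2 n 1).map (hTerm n) =
          (PySem.List.pyRange 2 n 1).map (gTerm n) := by
        apply List.map_congr_left
        intro i hi
        rw [PySem.List.mem_pyRange_one] at hi
        unfold hTerm gTerm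
        rw [if_neg (by omega), if_neg (by omega)]
      rw [hsplit, hone]
      simp only [List.map_append, List.sum_append, hmid]
      have h1v : hTerm n 1 = n := by unfold hTerm; simp
      have g1v : gTerm n 1 = 1 := by unfold gTerm; ring
      have hnv : hTerm n n = 1 := by unfold hTerm; rw [if_neg (by omega), if_pos rfl]
      have gnv : gTerm n n = n := by unfold gTerm; ring
      simp only [List.map_cons, List.map_nil, List.sum_cons, List.sum_nil,
        h1v, g1v, hnv, gnv]
      ring

lemma sum_g_closed (n : Int) (hn : 0 ≤ n) :
    ((PySem.List.pyRange 1 (n + 1) 1).map (gTerm n)).sum =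
      PySem.Int.floordiv (n * (n * n + 5)) 6 := by
  rw [PySem.List.pyRange_one, List.map_map]
  set m : Nat := (n + 1 - 1).toNat with hm
  have hmi : (m : Int) = n := by omega
  have hcomp : (gTerm n ∘ fun (k : Nat) => 1 + (k : Int)) =
      fun (k : Nat) => gTerm n (1 + (k : Int)) := rfl
  rw [hcomp]
  have h6 := sum_g_range n m
  rw [hmi] at h6
  have h6' : 6 * ((List.range m).map (fun (k : Nat) => gTerm n (1 + (k : Int)))).sum =
      n * (n * n + 5) := by rw [h6]; ring
  rw [PySem.Int.floordiv_eq_ediv_of_pos (by norm_num), ← h6',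
    Int.mul_ediv_cancel_left _ (by norm_num)]

-- ===== VERDICT (by name: the statement is the Claim_ definition above) =====
theorem func_spec : Claim_equal_func := by
  intro n _
  unfold Spec_func func_alt
  rcases (by omega : 0 ≤ n ∨ n < 0) with hn | hn
  · rw [if_pos hn, func_eq_sum, sum_h_eq_sum_g, sum_g_closed n hn]
  · rw [if_neg (by omega), func_eq_sum,
      PySem.List.pyRange_one_eq_nil (by omega)]
    simp
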